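-- pv_equiv track=rewrite | github.com/Surbeivol/daily-coding-problems | solutions/disk_stacking.py | disk_stacking
-- ===== SOURCE A (Python) =====
-- def disk_stacking(disks):
--
--     stack_he_i = 0
--     stack_di_i = 1
--     di_he_i = 2
--     # sort disks by height
--     disks.sort(key=lambda disk: disk[di_he_i])
--     # we will store here the cum max height of all possible stacks
--     # up to each disk and the indexes of the disks to build this stack
--     # initially we assume at least we could build a stack of a single disk
--     # for every disk
--     max_stack = [[disk[di_he_i], [idx]] for idx, disk in enumerate(disks)]
--
--     # For every disk, we look if we could stack previous stacks with
--     # their corresponding biggest base disk and its max height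
--     for bot in range(1, len(disks)):
--         for top in range(bot):
--             if _can_stack(disks[top], disks[bot]):
--                 # combine prev max stack with current disk
--                 new_stack = [max_stack[top][stack_he_i] + disks[bot][di_he_i],
--                              max_stack[top][stack_di_i] + [bot]]
--                 max_stack[bot] = max(max_stack[bot], new_stack)
--     return [disks[idx] for idx in max(max_stack)[1]]
--
-- def _can_stack(top_disk, bottom_disk):
--     """ Checks if top_disk could be stacked upon bottom_disk
--         based on their dimensions
--     """
--     return all([top < bot for top, bot in zip(top_disk, bottom_disk)])
-- ===== SOURCE B (Python) =====
-- def disk_stacking(disks):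
--     # top-down memoized recursion instead of the bottom-up array DP (sorts disks in place, like A)
--     disks.sort(key=lambda d: d[2])
--     cache = {}
--
--     def best(i):
--         # tallest stack (as [height, index list]) with disk i at the bottom
--         if i not in cache:
--             res = [disks[i][2], [i]]
--             for t in range(i):
--                 if _can_stack(disks[t], disks[i]):
--                     h, ids = best(t)
--                     res = max(res, [h + disks[i][2], ids + [i]])
--             cache[i] = res
--         return cache[i]
--
--     return [disks[idx] for idx in max(best(i) for i in range(len(disks)))[1]]
--
-- def _can_stack(top_disk, bottom_disk):
--     return all([top < bot for top, bot in zip(top_disk, bottom_disk)])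
-- ===== Notes on version B (the rewrite author's own statement) =====
-- stated objective: alternative
-- what changed: Replaces the bottom-up DP over a mutable max_stack array (nested index loops updating entries in place) with a top-down memoized recursion best(i) that returns the tallest [height, index-list] stack with disk i at the bottom, keeping the in-place sort and the lexicographic list tie-break.
import Mathlib
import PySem

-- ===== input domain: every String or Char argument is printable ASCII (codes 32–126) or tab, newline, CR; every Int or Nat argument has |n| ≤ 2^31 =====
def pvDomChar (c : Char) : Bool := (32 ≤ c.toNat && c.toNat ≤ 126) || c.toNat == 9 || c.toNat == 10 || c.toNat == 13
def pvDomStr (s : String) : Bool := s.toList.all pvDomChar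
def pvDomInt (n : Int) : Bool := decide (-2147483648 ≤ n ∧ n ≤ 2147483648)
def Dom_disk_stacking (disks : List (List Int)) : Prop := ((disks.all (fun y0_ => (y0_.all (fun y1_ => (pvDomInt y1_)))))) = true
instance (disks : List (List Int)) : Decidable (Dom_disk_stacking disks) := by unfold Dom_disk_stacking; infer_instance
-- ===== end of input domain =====

-- B replaces A's bottom-up mutable-array DP by a top-down memoized recursion best(i) (alternative
-- decomposition, same cost). Both Pythons sort `disks` in place; the theorems are about the return value.

-- ===== PORT A =====
-- shared helper `_can_stack` (both Pythons call it)
def canStack (top_disk bottom_disk : List Int) : Bool :=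
  (top_disk.zip bottom_disk).all (fun p => decide (p.1 < p.2))

-- Python's `<` on [int, [int]] lists: height first, then the index list lexicographically
def lexLt : List Int → List Int → Bool
  | [], [] => false
  | [], _ :: _ => true
  | _ :: _, [] => false
  | a :: as, b :: bs => a < b || (a == b && lexLt as bs)

-- Python max(x, y) on such pairs (returns x on ties, but ties are equal values)
def pyMax2 (x y : Int × List Int) : Int × List Int :=
  if x.1 < y.1 || (x.1 == y.1 && lexLt x.2 y.2) then y else x

-- the max_stack array after A's nested loops (helper for A's port)
def msA (ds : List (List Int)) : List (Int × List Int) :=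
  (PySem.List.pyRange 1 ds.length 1).foldl
      (fun ms bot => (PySem.List.pyRange 0 bot 1).foldl (fun ms top =>
          if canStack (PySem.List.pyGetD ds top []) (PySem.List.pyGetD ds bot []) then
            PySem.List.pySetD ms bot (pyMax2 (PySem.List.pyGetD ms bot (0, []))
              ((PySem.List.pyGetD ms top (0, [])).1 +
                 PySem.List.pyGetD (PySem.List.pyGetD ds bot []) 2 0,
               (PySem.List.pyGetD ms top (0, [])).2 ++ [bot]))
          else ms) ms)
      ((PySem.List.enumerate ds 0).map (fun p => (PySem.List.pyGetD p.2 2 0, [p.1])))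

def disk_stacking (disks : List (List Int)) : List (List Int) :=
  let ds := PySem.List.sorted disks (fun d => PySem.List.pyGetD d 2 0) false
  match msA ds with
  | [] => []  -- Python raises ValueError here (max of empty list); excluded by Pre_
  | h :: t => (t.foldl pyMax2 h).2.map (fun idx => PySem.List.pyGetD ds idx [])

-- ===== PORT B =====
-- best(i): tallest stack (height, index list) with disk i at the bottom (memoization is a
-- performance device in Source B; the recursion itself is ported)
def bestB (ds : List (List Int)) (i : Nat) : Int × List Int :=
  (List.range i).attach.foldl
    (fun res t =>
      if canStack (ds.getD t.1 []) (ds.getD i []) then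
        pyMax2 res ((bestB ds t.1).1 + PySem.List.pyGetD (ds.getD i []) 2 0,
                    (bestB ds t.1).2 ++ [(i : Int)])
      else res)
    (PySem.List.pyGetD (ds.getD i []) 2 0, [(i : Int)])
termination_by i
decreasing_by exact List.mem_range.mp t.2

def disk_stacking_alt (disks : List (List Int)) : List (List Int) :=
  let ds := PySem.List.sorted disks (fun d => PySem.List.pyGetD d 2 0) false
  match (List.range ds.length).map (bestB ds) with
  | [] => []  -- Python raises ValueError here (max of empty generator); excluded by Pre_
  | h :: t => (t.foldl pyMax2 h).2.map (fun idx => PySem.List.pyGetD ds idx [])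

-- ===== PRECONDITION & SPEC =====
-- Pre_ excludes exactly the inputs where both Pythons raise: the empty list (ValueError from max)
-- and any disk with fewer than 3 entries (IndexError from the sort key disk[2]).
def Pre_disk_stacking (disks : List (List Int)) : Prop :=
  disks ≠ [] ∧ ∀ d ∈ disks, 3 ≤ d.length
instance (disks : List (List Int)) : Decidable (Pre_disk_stacking disks) := by
  unfold Pre_disk_stacking; infer_instance
def pvWitness_disk_stacking : List (List Int) := [[2, 2, 2], [1, 1, 1]]

def Spec_disk_stacking (disks : List (List Int)) (out : List (List Int)) : Prop := out = disk_stacking_alt disks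
instance (disks : List (List Int)) (out : List (List Int)) : Decidable (Spec_disk_stacking disks out) := by unfold Spec_disk_stacking; infer_instance

-- ===== CLAIM (what is proved, stated in full; the proofs are below) =====
def Claim_equal_disk_stacking : Prop := ∀ (disks : List (List Int)), Dom_disk_stacking disks → Pre_disk_stacking disks → Spec_disk_stacking disks (disk_stacking disks)

-- ===== LEMMAS AND PROOFS =====

-- the singleton-stack value for index i
def initP (ds : List (List Int)) (i : Nat) : Int × List Int :=
  (PySem.List.pyGetD (ds.getD i []) 2 0, [(i : Int)])

-- bestB's fold step, over plain Nat indices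
def gStep (ds : List (List Int)) (k : Nat) (res : Int × List Int) (t : Nat) : Int × List Int :=
  if canStack (ds.getD t []) (ds.getD k []) then
    pyMax2 res ((bestB ds t).1 + PySem.List.pyGetD (ds.getD k []) 2 0,
                (bestB ds t).2 ++ [(k : Int)])
  else res

-- A's max_stack array after the first k disks have been finalised
def stateS (ds : List (List Int)) (k : Nat) : List (Int × List Int) :=
  (List.range ds.length).map (fun i => if i < k then bestB ds i else initP ds i)

lemma bestB_eq (ds : List (List Int)) (k : Nat) :
    bestB ds k = (List.range k).foldl (gStep ds k) (initP ds k) := by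
  rw [bestB]
  exact List.foldl_attach (f := gStep ds k) (l := List.range k) (b := initP ds k)

theorem stateS_length (ds : List (List Int)) (k : Nat) :
    (stateS ds k).length = ds.length := by simp [stateS]

theorem pySetD_natCast {α : Type} (xs : List α) (n : Nat) (v : α) (h : n < xs.length) :
    PySem.List.pySetD xs (n : Int) v = xs.set n v := by
  simp [PySem.List.pySetD, PySem.List.pySet?, PySem.List.pyIdx?, h]

theorem getD_set_stateS (ds : List (List Int)) (k a : Nat) (v : Int × List Int)
    (hk : k < ds.length) (ha : a < ds.length) :
    ((stateS ds k).set k v).getD a (0, ([] : List Int)) =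
      if a = k then v else if a < k then bestB ds a else initP ds a := by
  rw [List.getD_eq_getElem?_getD, List.getElem?_set]
  by_cases hak : k = a
  · subst hak; simp [stateS_length, hk]
  · simp only [hak, if_false]
    have : a < (List.range ds.length).length := by simpa using ha
    simp [stateS, Ne.symm hak, List.getElem?_range, ha]

theorem set_stateS (ds : List (List Int)) (k : Nat) (hk : k < ds.length) :
    (stateS ds k).set k (bestB ds k) = stateS ds (k + 1) := by
  apply List.ext_getElem
  · simp [stateS_length, stateS]
  · intro i h1 h2
    have hi : i < ds.length := by simpa [stateS_length] using h2
    rw [List.getElem_set]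
    simp only [stateS, List.getElem_map, List.getElem_range]
    by_cases hik : k = i
    · subst hik; simp
    · have : i < k ↔ i < k + 1 := by omega
      simp [hik, this]

theorem set_stateS_self (ds : List (List Int)) (k : Nat) (hk : k < ds.length) :
    (stateS ds k).set k (initP ds k) = stateS ds k := by
  apply List.ext_getElem
  · simp [stateS_length]
  · intro i h1 h2
    rw [List.getElem_set]
    simp only [stateS, List.getElem_map, List.getElem_range]
    by_cases hik : k = i
    · subst hik; simp
    · simp [hik]

theorem inner_thread (ds : List (List Int)) (k : Nat) (hk : k < ds.length) :
    ∀ (m a : Nat) (v : Int × List Int), a + m = k →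
    (PySem.List.pyRange (a : Int) (k : Int) 1).foldl
      (fun ms top =>
        if canStack (PySem.List.pyGetD ds top []) (PySem.List.pyGetD ds (k : Int) []) then
          PySem.List.pySetD ms (k : Int) (pyMax2 (PySem.List.pyGetD ms (k : Int) (0, []))
            ((PySem.List.pyGetD ms top (0, [])).1 +
               PySem.List.pyGetD (PySem.List.pyGetD ds (k : Int) []) 2 0,
             (PySem.List.pyGetD ms top (0, [])).2 ++ [(k : Int)]))
        else ms)
      ((stateS ds k).set k v)
    = (stateS ds k).set k ((List.range' a m).foldl (gStep ds k) v) := by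
  intro m
  induction m with
  | zero =>
      intro a v hav
      have hak : a = k := by omega
      subst hak
      rw [PySem.List.pyRange_one_eq_nil (le_refl _)]
      simp [List.range']
  | succ m ih =>
      intro a v hav
      have hak : a < k := by omega
      have hlen : k < ((stateS ds k).set k v).length := by
        simp [stateS_length, hk]
      rw [PySem.List.pyRange_one_cons (by exact_mod_cast hak)]
      simp only [List.foldl_cons]
      have hget_a : PySem.List.pyGetD ((stateS ds k).set k v) (a : Int) (0, ([] : List Int))
          = bestB ds a := by
        rw [PySem.List.pyGetD_natCast,
            getD_set_stateS ds k a v hk (by omega)]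
        simp [Nat.ne_of_lt hak, hak]
      have hget_k : PySem.List.pyGetD ((stateS ds k).set k v) (k : Int) (0, ([] : List Int)) = v := by
        rw [PySem.List.pyGetD_natCast, List.getD_eq_getElem?_getD, List.getElem?_set]
        simp [stateS_length, hk]
      have hrange' : List.range' a (m + 1) = a :: List.range' (a + 1) m := List.range'_succ
      have hcast : (a : Int) + 1 = ((a + 1 : Nat) : Int) := by push_cast; ring
      rw [hrange']
      simp only [List.foldl_cons]
      by_cases hcs : canStack (ds.getD a []) (ds.getD k [])
      · have hcs' : canStack (PySem.List.pyGetD ds (a : Int) [])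
            (PySem.List.pyGetD ds (k : Int) []) = true := by
          simpa [PySem.List.pyGetD_natCast] using hcs
        rw [if_pos hcs', hget_a, hget_k]
        have hsetset : PySem.List.pySetD ((stateS ds k).set k v) (k : Int)
              (pyMax2 v ((bestB ds a).1 + PySem.List.pyGetD (PySem.List.pyGetD ds (k : Int) []) 2 0,
                         (bestB ds a).2 ++ [(k : Int)]))
            = (stateS ds k).set k
              (pyMax2 v ((bestB ds a).1 + PySem.List.pyGetD (PySem.List.pyGetD ds (k : Int) []) 2 0,
                         (bestB ds a).2 ++ [(k : Int)])) := by
          rw [pySetD_natCast _ _ _ hlen, List.set_set]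
        rw [hsetset, hcast, ih (a + 1) _ (by omega)]
        have hcs2 := hcs
        simp only [List.getD_eq_getElem?_getD] at hcs2
        have : gStep ds k v a
            = pyMax2 v ((bestB ds a).1 + PySem.List.pyGetD (PySem.List.pyGetD ds (k : Int) []) 2 0,
                        (bestB ds a).2 ++ [(k : Int)]) := by
          simp [gStep, hcs2, List.getD_eq_getElem?_getD, PySem.List.pyGetD_natCast]
        rw [this]
      · have hcs' : ¬ (canStack (PySem.List.pyGetD ds (a : Int) [])
            (PySem.List.pyGetD ds (k : Int) []) = true) := by
          simpa [PySem.List.pyGetD_natCast] using hcs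
        rw [if_neg hcs', hcast, ih (a + 1) v (by omega)]
        have hcs2 := hcs
        simp only [List.getD_eq_getElem?_getD] at hcs2
        have : gStep ds k v a = v := by simp [gStep, hcs2, List.getD_eq_getElem?_getD]
        rw [this]

theorem enumerate_eq_map_range (ds : List (List Int)) :
    ∀ (s : Int), PySem.List.enumerate ds s
      = (List.range ds.length).map (fun (i : Nat) => ((s + (i : Int)), ds.getD i [])) := by
  induction ds with
  | nil => intro s; simp [PySem.List.enumerate]
  | cons d ds ih =>
      intro s
      rw [PySem.List.enumerate_cons, ih (s + 1)]
      simp only [List.length_cons, List.range_succ_eq_map, List.map_cons, List.map_map]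
      refine List.cons_eq_cons.mpr ⟨by simp, ?_⟩
      apply List.map_congr_left
      intro a _
      simp only [Function.comp_apply, List.getD_cons_succ, Prod.mk.injEq]
      exact ⟨by push_cast; ring, trivial⟩

theorem initMS_eq (ds : List (List Int)) :
    (PySem.List.enumerate ds 0).map (fun p => (PySem.List.pyGetD p.2 2 0, [p.1]))
      = (List.range ds.length).map (initP ds) := by
  rw [enumerate_eq_map_range ds 0, List.map_map]
  apply List.map_congr_left
  intro i hi
  simp [initP, List.getD_eq_getElem?_getD]

theorem initMS_eq_stateS_one (ds : List (List Int)) :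
    (PySem.List.enumerate ds 0).map (fun p => (PySem.List.pyGetD p.2 2 0, [p.1]))
      = stateS ds 1 := by
  rw [initMS_eq, stateS]
  apply List.map_congr_left
  intro i hi
  by_cases h0 : i = 0
  · subst h0
    simp [bestB_eq, initP]
  · rw [if_neg (by omega)]

theorem outer_thread (ds : List (List Int)) :
    ∀ (k : Nat), 1 ≤ k → k ≤ ds.length →
    (PySem.List.pyRange 1 (k : Int) 1).foldl
      (fun ms bot => (PySem.List.pyRange 0 bot 1).foldl (fun ms top =>
          if canStack (PySem.List.pyGetD ds top []) (PySem.List.pyGetD ds bot []) then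
            PySem.List.pySetD ms bot (pyMax2 (PySem.List.pyGetD ms bot (0, []))
              ((PySem.List.pyGetD ms top (0, [])).1 +
                 PySem.List.pyGetD (PySem.List.pyGetD ds bot []) 2 0,
               (PySem.List.pyGetD ms top (0, [])).2 ++ [bot]))
          else ms) ms)
      ((PySem.List.enumerate ds 0).map (fun p => (PySem.List.pyGetD p.2 2 0, [p.1])))
    = stateS ds k := by
  intro k
  induction k with
  | zero => intro h1 _; omega
  | succ k ih =>
      intro h1 h2
      by_cases hk1 : k = 0
      · subst hk1
        rw [show ((1 : Nat) : Int) = 1 by norm_num] at *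
        rw [PySem.List.pyRange_one_eq_nil (by norm_num)]
        simpa using initMS_eq_stateS_one ds
      · have hk : k < ds.length := by omega
        have hcast : ((k + 1 : Nat) : Int) = (k : Int) + 1 := by push_cast; ring
        rw [hcast, PySem.List.pyRange_one_succ_right (by exact_mod_cast Nat.one_le_iff_ne_zero.mpr hk1),
            List.foldl_append, ih (by omega) (by omega)]
        simp only [List.foldl_cons, List.foldl_nil]
        have hstart : stateS ds k = (stateS ds k).set k (initP ds k) :=
          (set_stateS_self ds k hk).symm
        rw [hstart]
        have := inner_thread ds k hk k 0 (initP ds k) (by omega)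
        rw [show ((0 : Nat) : Int) = 0 by norm_num] at this
        rw [this]
        rw [← List.range_eq_range', ← bestB_eq, set_stateS ds k hk]

theorem msA_eq (ds : List (List Int)) (h1 : 1 ≤ ds.length) :
    msA ds = stateS ds ds.length := by
  unfold msA
  exact outer_thread ds ds.length h1 (le_refl _)

theorem ports_agree (ds : List (List Int)) :
    (match msA ds with
     | [] => ([] : List (List Int))
     | h :: t => (t.foldl pyMax2 h).2.map (fun idx => PySem.List.pyGetD ds idx []))
    = (match (List.range ds.length).map (bestB ds) with
       | [] => []
       | h :: t => (t.foldl pyMax2 h).2.map (fun idx => PySem.List.pyGetD ds idx [])) := by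
  by_cases hn : ds.length = 0
  · have : ds = [] := List.length_eq_zero_iff.mp hn
    subst this
    rfl
  · rw [msA_eq ds (by omega)]
    have : (List.range ds.length).map (bestB ds) = stateS ds ds.length := by
      rw [stateS]
      apply List.map_congr_left
      intro i hi
      rw [if_pos (List.mem_range.mp hi)]
    rw [this]

-- ===== VERDICT (by name: the statement is the Claim_ definition above) =====
theorem disk_stacking_spec : Claim_equal_disk_stacking := by
  intro disks _ _
  exact ports_agree (PySem.List.sorted disks (fun d => PySem.List.pyGetD d 2 0) false)
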